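-- pv_equiv track=rewrite | github.com/TaliaferroLab/AnalysisScripts | getbammutations.py | getrecurringmuts
-- ===== SOURCE A (Python) =====
-- def getrecurringmuts(listofmuts_f, listofmuts_r, overlapstart, overlapend):
-- 	recurringmuts = []
-- 	for m in listofmuts_f:
-- 		if m >= overlapstart and m <= overlapend:
-- 			if m in listofmuts_r:
-- 				recurringmuts.append(m)
-- 		elif m < overlapstart or m > overlapend: #if it's outside the overlap we have to assume it's recurring
-- 			recurringmuts.append(m)
--
-- 	for m in listofmuts_r:
-- 		if m >= overlapstart and m <= overlapend:
-- 			if m in listofmuts_f: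
-- 				recurringmuts.append(m)
-- 		elif m < overlapstart or m > overlapend:
-- 			recurringmuts.append(m)
--
-- 	#Remove duplicates
-- 	recurringmuts = list(set(recurringmuts))
--
-- 	return recurringmuts
-- ===== SOURCE B (Python) =====
-- def getrecurringmuts(listofmuts_f, listofmuts_r, overlapstart, overlapend):
--     # Set algebra: an element fails to recur exactly when it lies inside the
--     # overlap and in only one of the two lists, i.e. it is in the symmetric
--     # difference restricted to [overlapstart, overlapend].  Everything else
--     # in the union recurs.
--     drop = {m for m in set(listofmuts_f) ^ set(listofmuts_r)
--             if overlapstart <= m <= overlapend}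
--     return [m for m in dict.fromkeys(listofmuts_f + listofmuts_r) if m not in drop]
-- ===== Notes on version B (the rewrite author's own statement) =====
-- stated objective: alternative
-- what changed: Replaces A's two four-branch conditional-append loops with per-element scans of the other list by pure set algebra: compute drop = (set(f) ^ set(r)) restricted to the overlap, then return the ordered deduplication of f+r with drop removed; the keep/discard logic is inverted into a symmetric-difference complement and there is no branch on the overlap in the output pass.
import Mathlib
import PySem

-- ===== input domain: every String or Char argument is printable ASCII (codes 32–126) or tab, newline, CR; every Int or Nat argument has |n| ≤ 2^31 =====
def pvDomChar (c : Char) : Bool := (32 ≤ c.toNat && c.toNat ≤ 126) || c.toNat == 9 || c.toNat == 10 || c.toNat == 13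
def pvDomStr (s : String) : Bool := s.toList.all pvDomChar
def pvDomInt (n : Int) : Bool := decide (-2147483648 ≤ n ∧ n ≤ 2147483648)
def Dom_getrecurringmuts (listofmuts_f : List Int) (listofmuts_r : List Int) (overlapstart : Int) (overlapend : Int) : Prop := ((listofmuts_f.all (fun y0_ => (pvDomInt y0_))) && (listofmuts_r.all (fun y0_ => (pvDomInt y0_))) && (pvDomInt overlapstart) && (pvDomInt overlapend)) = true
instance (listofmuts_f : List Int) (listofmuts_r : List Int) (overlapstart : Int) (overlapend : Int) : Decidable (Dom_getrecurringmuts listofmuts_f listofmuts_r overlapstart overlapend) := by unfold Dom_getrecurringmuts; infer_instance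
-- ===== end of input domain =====

-- B replaces A's two branchy conditional-append loops by set algebra: it computes the elements
-- that fail to recur (the symmetric difference restricted to the overlap) and removes them from
-- the ordered deduplication of the concatenation (alternative algorithm).
-- A returns list(set(...)), whose Python iteration order is not modelled; both ports use
-- first-occurrence order and the equivalence is about that deduplicated value (compared as a set).

-- ===== PORT A =====
def getrecurringmuts (listofmuts_f : List Int) (listofmuts_r : List Int) (overlapstart : Int) (overlapend : Int) : List Int :=
  -- first loop over listofmuts_f
  let recurringmuts : List Int := listofmuts_f.foldl (fun acc m =>
      if overlapstart ≤ m ∧ m ≤ overlapend then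
        (if listofmuts_r.contains m then acc ++ [m] else acc)
      else if m < overlapstart ∨ overlapend < m then acc ++ [m]
      else acc) []
  -- second loop over listofmuts_r
  let recurringmuts : List Int := listofmuts_r.foldl (fun acc m =>
      if overlapstart ≤ m ∧ m ≤ overlapend then
        (if listofmuts_f.contains m then acc ++ [m] else acc)
      else if m < overlapstart ∨ overlapend < m then acc ++ [m]
      else acc) recurringmuts
  -- list(set(recurringmuts)): set iteration order is not modelled; first-occurrence order used
  PySem.Set.ofList recurringmuts

-- ===== PORT B =====
def getrecurringmuts_alt (listofmuts_f : List Int) (listofmuts_r : List Int) (overlapstart : Int) (overlapend : Int) : List Int :=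
  -- drop = {m for m in set(f) ^ set(r) if overlapstart <= m <= overlapend}
  let drop : PySem.Set Int :=
    (PySem.Set.symmDiff (PySem.Set.ofList listofmuts_f) (PySem.Set.ofList listofmuts_r)).filter
      (fun m => decide (overlapstart ≤ m) && decide (m ≤ overlapend))
  -- [m for m in dict.fromkeys(f + r) if m not in drop]
  (PySem.List.dedup (listofmuts_f ++ listofmuts_r)).filter
    (fun m => ! PySem.Set.contains drop m)

-- ===== PRECONDITION & SPEC =====
def Spec_getrecurringmuts (listofmuts_f : List Int) (listofmuts_r : List Int) (overlapstart : Int) (overlapend : Int) (out : List Int) : Prop := out = getrecurringmuts_alt listofmuts_f listofmuts_r overlapstart overlapend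
instance (listofmuts_f : List Int) (listofmuts_r : List Int) (overlapstart : Int) (overlapend : Int) (out : List Int) : Decidable (Spec_getrecurringmuts listofmuts_f listofmuts_r overlapstart overlapend out) := by unfold Spec_getrecurringmuts; infer_instance

-- ===== CLAIM (what is proved, stated in full; the proofs are below) =====
def Claim_equal_getrecurringmuts : Prop := ∀ (listofmuts_f : List Int) (listofmuts_r : List Int) (overlapstart : Int) (overlapend : Int), Dom_getrecurringmuts listofmuts_f listofmuts_r overlapstart overlapend → Spec_getrecurringmuts listofmuts_f listofmuts_r overlapstart overlapend (getrecurringmuts listofmuts_f listofmuts_r overlapstart overlapend)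

-- ===== LEMMAS AND PROOFS =====

-- A's loop body is an append-if with a single combined test.
theorem pv_body_eq (other : List Int) (s e : Int) :
    (fun (acc : List Int) (m : Int) =>
      if s ≤ m ∧ m ≤ e then
        (if other.contains m then acc ++ [m] else acc)
      else if m < s ∨ e < m then acc ++ [m]
      else acc)
    = (fun acc m =>
      if (decide (m < s) || decide (e < m) || other.contains m) = true then acc ++ [m] else acc) := by
  funext acc m
  by_cases h1 : s ≤ m ∧ m ≤ e
  · have hs : decide (m < s) = false := by simp; omega
    have he : decide (e < m) = false := by simp; omega
    by_cases h2 : other.contains m = true <;> simp [h1, h2, hs, he]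
  · have h3 : m < s ∨ e < m := by omega
    have hb : (decide (m < s) || decide (e < m)) = true := by
      rcases h3 with h | h <;> simp [h]
    simp [h1, h3, hb]

-- on a member of f, A's keep-test equals B's "not dropped" test; same for r by symmetry
theorem pv_keep_mem (f r : List Int) (s e : Int) (m : Int)
    (hfr : m ∈ f ∨ m ∈ r) (other : List Int)
    (hother : (other.contains m = true) ↔ (m ∈ f ∧ m ∈ r)) :
    (decide (m < s) || decide (e < m) || other.contains m)
    = (! PySem.Set.contains
        ((PySem.Set.symmDiff (PySem.Set.ofList f) (PySem.Set.ofList r)).filter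
          (fun m => decide (s ≤ m) && decide (m ≤ e))) m) := by
  have hd : (PySem.Set.contains
      ((PySem.Set.symmDiff (PySem.Set.ofList f) (PySem.Set.ofList r)).filter
        (fun m => decide (s ≤ m) && decide (m ≤ e))) m = true)
      ↔ (¬ (m ∈ f ∧ m ∈ r) ∧ s ≤ m ∧ m ≤ e) := by
    simp [List.mem_filter, PySem.Set.mem_symmDiff, PySem.Set.mem_ofList]
    tauto
  cases hB : PySem.Set.contains
      ((PySem.Set.symmDiff (PySem.Set.ofList f) (PySem.Set.ofList r)).filter
        (fun m => decide (s ≤ m) && decide (m ≤ e))) m with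
  | true =>
    obtain ⟨hb, h1, h2⟩ := hd.mp hB
    have ho : other.contains m = false := by
      cases hO : other.contains m
      · rfl
      · exact absurd (hother.mp hO) hb
    have d1 : decide (m < s) = false := by simp; omega
    have d2 : decide (e < m) = false := by simp; omega
    simp only [d1, d2, Bool.false_or, Bool.not_true]
    exact ho
  | false =>
    have hnot : ¬ (¬ (m ∈ f ∧ m ∈ r) ∧ s ≤ m ∧ m ≤ e) :=
      fun h => by rw [hd.mpr h] at hB; exact Bool.noConfusion hB
    simp only [Bool.not_false]
    by_cases hin : s ≤ m ∧ m ≤ e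
    · have hboth : m ∈ f ∧ m ∈ r := by tauto
      have hc : other.contains m = true := hother.mpr hboth
      rw [hc]
      simp
    · have h3 : m < s ∨ e < m := by omega
      rcases h3 with h | h <;> simp [h]

-- set(filter) = filter(set): Python's dedup commutes with a pure filter
theorem pv_ofList_filter (q : Int → Bool) (l : List Int) :
    PySem.Set.ofList (l.filter q) = List.filter q (PySem.Set.ofList l) := by
  induction l with
  | nil => simp [PySem.Set.ofList_nil]
  | cons x xs ih =>
    by_cases h : q x = true
    · rw [List.filter_cons_of_pos h, PySem.Set.ofList_cons, PySem.Set.ofList_cons, ih,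
        List.filter_cons_of_pos h]
      congr 1
      show (PySem.Set.discard (List.filter q (PySem.Set.ofList xs)) x : List Int)
          = List.filter q (PySem.Set.discard (PySem.Set.ofList xs) x)
      simp only [PySem.Set.discard, List.filter_filter]
      apply List.filter_congr
      intro y _
      exact Bool.and_comm _ _
    · rw [List.filter_cons_of_neg h, PySem.Set.ofList_cons, ih,
        List.filter_cons_of_neg h]
      show List.filter q (PySem.Set.ofList xs)
          = List.filter q (PySem.Set.discard (PySem.Set.ofList xs) x)
      simp only [PySem.Set.discard, List.filter_filter]
      apply List.filter_congr
      intro y _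
      by_cases hy : y = x
      · subst hy
        simp [h]
      · simp [hy]

-- ===== VERDICT (by name: the statement is the Claim_ definition above) =====
theorem getrecurringmuts_spec : Claim_equal_getrecurringmuts := by
  intro f r s e _hDom
  unfold Spec_getrecurringmuts getrecurringmuts getrecurringmuts_alt
  rw [pv_body_eq r s e, pv_body_eq f s e]
  simp only [PySem.List.foldl_append_if_eq_filter, List.nil_append, PySem.List.dedup_eq_ofList]
  have hf : f.filter (fun m => decide (m < s) || decide (e < m) || r.contains m)
      = f.filter (fun m => ! PySem.Set.contains
          ((PySem.Set.symmDiff (PySem.Set.ofList f) (PySem.Set.ofList r)).filter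
            (fun m => decide (s ≤ m) && decide (m ≤ e))) m) := by
    apply List.filter_congr
    intro m hm
    exact pv_keep_mem f r s e m (Or.inl hm) r (by simp [hm])
  have hr : r.filter (fun m => decide (m < s) || decide (e < m) || f.contains m)
      = r.filter (fun m => ! PySem.Set.contains
          ((PySem.Set.symmDiff (PySem.Set.ofList f) (PySem.Set.ofList r)).filter
            (fun m => decide (s ≤ m) && decide (m ≤ e))) m) := by
    apply List.filter_congr
    intro m hm
    exact pv_keep_mem f r s e m (Or.inr hm) f (by simp [hm])
  rw [hf, hr, ← List.filter_append, pv_ofList_filter]
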